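-- pv_equiv track=rewrite | github.com/Itsayu/DSA | Farthest number - GFG/farthest-number.py | farNumber
-- ===== SOURCE A (Python) =====
-- def farNumber(N,Arr):
--     #code here
--     ans=[-1]*N
--     for i in range(N):
--         for j in range(N-1,i,-1):
--             if Arr[j]<Arr[i]:
--                 ans[i]=j
--                 break
--     return ans
-- ===== SOURCE B (Python) =====
-- def farNumber(N, Arr):
--     # suffix-minimum array + binary search per index: the suffix minima are
--     # non-decreasing, so the candidate set is a prefix and bisection finds
--     # the farthest smaller element
--     if N <= 0:
--         return []
--     suff = [0] * N
--     suff[N - 1] = Arr[N - 1]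
--     for j in range(N - 2, -1, -1):
--         suff[j] = min(Arr[j], suff[j + 1])
--     ans = []
--     for i in range(N):
--         x = Arr[i]
--         lo, hi, res = i + 1, N - 1, -1
--         while lo <= hi:
--             mid = (lo + hi) // 2
--             if suff[mid] < x:
--                 res = mid
--                 lo = mid + 1
--             else:
--                 hi = mid - 1
--         ans.append(res)
--     return ans
-- ===== Notes on version B (the rewrite author's own statement) =====
-- stated objective: alternative
-- what changed: A's per-index backward scan is replaced by one suffix-minimum array built right-to-left plus a binary search per index (the suffix minima are non-decreasing, so the indices whose suffix minimum is below Arr[i] form a prefix and the farthest smaller element is found by bisection); O(n^2) worst case becomes O(n log n), though on inputs where A's scan breaks immediately A is comparable or faster.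
import Mathlib
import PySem

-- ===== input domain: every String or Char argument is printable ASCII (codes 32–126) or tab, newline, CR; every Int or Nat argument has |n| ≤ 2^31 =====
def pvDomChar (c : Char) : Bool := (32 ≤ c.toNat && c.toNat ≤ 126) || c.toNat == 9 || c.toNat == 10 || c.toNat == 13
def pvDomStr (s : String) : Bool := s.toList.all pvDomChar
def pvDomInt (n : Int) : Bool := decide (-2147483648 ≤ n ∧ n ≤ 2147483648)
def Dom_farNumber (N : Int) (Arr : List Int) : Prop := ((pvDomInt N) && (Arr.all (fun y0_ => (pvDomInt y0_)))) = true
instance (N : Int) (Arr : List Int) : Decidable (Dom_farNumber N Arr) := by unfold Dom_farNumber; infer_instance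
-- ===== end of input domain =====

-- B answers each index from a right-to-left suffix-minimum array with a binary
-- search (the suffix minima are non-decreasing) instead of A's per-index
-- backward scan — a different algorithm, same return value.

-- ===== PORT A =====
-- inner 'for j in range(N-1,i,-1): if Arr[j]<Arr[i]: ans[i]=j; break' is the
-- first j of the countdown range satisfying the test (find?); indexing is exact
-- under Pre_ (all indices are in range, so pyGetD's default is never used)
def farNumber (N : Int) (Arr : List Int) : List Int :=
  (PySem.List.pyRange 0 N 1).foldl
    (fun ans i =>
      match (PySem.List.pyRange (N-1) i (-1)).find?
          (fun j => decide (PySem.List.pyGetD Arr j 0 < PySem.List.pyGetD Arr i 0)) with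
      | some j => PySem.List.pySetD ans i j
      | none => ans)
    (List.replicate N.toNat (-1))

-- ===== PORT B =====
-- Source B's 'while lo <= hi' binary-search loop
def bsLoop (suff : List Int) (x : Int) (lo hi res : Int) : Int :=
  if h : lo ≤ hi then
    let mid := PySem.Int.floordiv (lo + hi) 2
    if PySem.List.pyGetD suff mid 0 < x then bsLoop suff x (mid + 1) hi mid
    else bsLoop suff x lo (mid - 1) res
  else res
termination_by (hi + 1 - lo).toNat
decreasing_by
  · have hb := PySem.Int.floordiv_two_mid_bounds h
    omega
  · have hb := PySem.Int.floordiv_two_mid_bounds h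
    omega

-- Source B's suffix-minimum build: suff = [0]*N; suff[N-1] = Arr[N-1];
-- for j in range(N-2,-1,-1): suff[j] = min(Arr[j], suff[j+1])
def suffArr (N : Int) (Arr : List Int) : List Int :=
  (PySem.List.pyRange (N-2) (-1) (-1)).foldl
    (fun s j => PySem.List.pySetD s j
        (min (PySem.List.pyGetD Arr j 0) (PySem.List.pyGetD s (j+1) 0)))
    (PySem.List.pySetD (List.replicate N.toNat 0) (N-1) (PySem.List.pyGetD Arr (N-1) 0))

def farNumber_alt (N : Int) (Arr : List Int) : List Int :=
  if N ≤ 0 then []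
  else
    let suff := suffArr N Arr
    (PySem.List.pyRange 0 N 1).foldl
      (fun ans i => ans ++ [bsLoop suff (PySem.List.pyGetD Arr i 0) (i+1) (N-1) (-1)]) []

-- ===== PRECONDITION & SPEC =====
-- Python A raises IndexError when N exceeds len(Arr) (it reads Arr[0..N-1]).
def Pre_farNumber (N : Int) (Arr : List Int) : Prop := N ≤ Arr.length
instance (N : Int) (Arr : List Int) : Decidable (Pre_farNumber N Arr) := by
  unfold Pre_farNumber; infer_instance
def pvWitness_farNumber : Int × List Int := (2, [3, 1])

def Spec_farNumber (N : Int) (Arr : List Int) (out : List Int) : Prop := out = farNumber_alt N Arr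
instance (N : Int) (Arr : List Int) (out : List Int) : Decidable (Spec_farNumber N Arr out) := by
  unfold Spec_farNumber; infer_instance

-- ===== CLAIM (what is proved, stated in full; the proofs are below) =====
def Claim_equal_farNumber : Prop := ∀ (N : Int) (Arr : List Int), Dom_farNumber N Arr → Pre_farNumber N Arr → Spec_farNumber N Arr (farNumber N Arr)

-- ===== LEMMAS AND PROOFS =====

-- suffix minimum of Arr over indices [j, N): spec-side description of Source B's suff
def sm (Arr : List Int) (N j : Int) : Int :=
  (PySem.List.pyRange (j+1) N 1).foldl
    (fun m t => min m (PySem.List.pyGetD Arr t 0)) (PySem.List.pyGetD Arr j 0)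

-- A's per-index result
def fA (N : Int) (Arr : List Int) (k : Nat) : Option Int :=
  (PySem.List.pyRange (N-1) (k : Int) (-1)).find?
    (fun j => decide (PySem.List.pyGetD Arr j 0 < PySem.List.pyGetD Arr (k : Int) 0))

theorem min_foldl (L : List Int) (g : Int → Int) :
    ∀ (a b : Int), min a (L.foldl (fun m t => min m (g t)) b)
      = L.foldl (fun m t => min m (g t)) (min a b) := by
  induction L with
  | nil => intro a b; simp
  | cons c L ih =>
    intro a b
    simp only [List.foldl_cons]
    rw [ih, min_assoc]

theorem sm_last (Arr : List Int) (N : Int) :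
    sm Arr N (N-1) = PySem.List.pyGetD Arr (N-1) 0 := by
  unfold sm
  rw [show N - 1 + 1 = N by ring, PySem.List.pyRange_one_eq_nil (le_refl N)]
  rfl

theorem sm_step (Arr : List Int) (N j : Int) (h : j < N - 1) :
    sm Arr N j = min (PySem.List.pyGetD Arr j 0) (sm Arr N (j+1)) := by
  unfold sm
  rw [PySem.List.pyRange_one_cons (by omega : j + 1 < N)]
  simp only [List.foldl_cons]
  rw [min_foldl]

theorem sm_le (Arr : List Int) (N j : Int) (h : j ≤ N - 1) :
    sm Arr N j ≤ PySem.List.pyGetD Arr j 0 := by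
  rcases lt_or_eq_of_le h with h' | h'
  · rw [sm_step Arr N j h']; exact min_le_left _ _
  · rw [h', sm_last]

theorem sm_mono (Arr : List Int) (N : Int) :
    ∀ (t : Nat) (j k : Int), (k - j).toNat = t → j ≤ k → k ≤ N - 1 →
      sm Arr N j ≤ sm Arr N k := by
  intro t
  induction t with
  | zero =>
    intro j k h1 h2 h3
    have : j = k := by omega
    exact le_of_eq (by rw [this])
  | succ t ih =>
    intro j k h1 h2 h3
    calc sm Arr N j ≤ sm Arr N (j+1) := by
          rw [sm_step Arr N j (by omega)]; exact min_le_right _ _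
      _ ≤ sm Arr N k := ih (j+1) k (by omega) (by omega) h3

-- generic: folding index-wise conditional updates over a list of indices
theorem foldl_optset (f : Nat → Option Int) :
    ∀ (L : List Nat) (s : List Int) (m : Nat), (∀ k ∈ L, k < s.length) →
      (L.foldl (fun s k => match f k with | some j => s.set k j | none => s) s)[m]? =
        if m ∈ L ∧ (f m).isSome = true then f m else s[m]? := by
  intro L
  induction L with
  | nil => intro s m _; simp
  | cons k L ih =>
    intro s m hL
    simp only [List.foldl_cons]
    have hlen : (match f k with | some j => s.set k j | none => s).length = s.length := by
      cases f k <;> simp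
    rw [ih _ m (fun k' hk' => by rw [hlen]; exact hL k' (List.mem_cons_of_mem _ hk'))]
    by_cases hm : m ∈ L ∧ (f m).isSome = true
    · rw [if_pos hm, if_pos ⟨List.mem_cons_of_mem _ hm.1, hm.2⟩]
    · rw [if_neg hm]
      by_cases hmk : m = k
      · subst hmk
        cases hf : f m with
        | none => simp
        | some j =>
          have hml : m < s.length := hL m (List.mem_cons_self ..)
          simp [hml]
      · cases hf : f k with
        | none => simp [hmk, hm]
        | some j =>
          rw [List.getElem?_set]
          simp [hmk, Ne.symm hmk, hm]

theorem farNumber_eq_map (N : Int) (Arr : List Int) :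
    farNumber N Arr = (List.range N.toNat).map (fun k => (fA N Arr k).getD (-1)) := by
  unfold farNumber
  rw [PySem.List.pyRange_one 0 N, List.foldl_map]
  simp only [sub_zero]
  have hstep : (fun (ans : List Int) (k : Nat) =>
      match (PySem.List.pyRange (N-1) ((0:Int) + (k:Int)) (-1)).find?
          (fun j => decide (PySem.List.pyGetD Arr j 0 < PySem.List.pyGetD Arr ((0:Int) + (k:Int)) 0)) with
      | some j => PySem.List.pySetD ans ((0:Int) + (k:Int)) j
      | none => ans)
      = (fun (ans : List Int) (k : Nat) =>
          match fA N Arr k with | some j => ans.set k j | none => ans) := by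
    funext ans k
    have h0 : (0:Int) + (k:Int) = (k:Int) := by ring
    rw [h0]
    unfold fA
    cases h : (PySem.List.pyRange (N-1) ((k:Int)) (-1)).find?
        (fun j => decide (PySem.List.pyGetD Arr j 0 < PySem.List.pyGetD Arr ((k:Int)) 0)) with
    | none => rfl
    | some j => simp
  rw [hstep]
  apply List.ext_getElem?
  intro m
  rw [foldl_optset (fA N Arr) _ _ m
    (by intro k hk; simp only [List.mem_range] at hk; simpa using hk)]
  rw [List.getElem?_map]
  by_cases hm : m < N.toNat
  · have hmem : m ∈ List.range N.toNat := List.mem_range.mpr hm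
    rw [List.getElem?_range hm]
    cases hf : fA N Arr m with
    | some j => rw [if_pos ⟨hmem, by simp [hf]⟩]; simp [hf]
    | none =>
      rw [if_neg (by simp [hf])]
      simp [hf, hm]
  · rw [if_neg (fun h => hm (List.mem_range.mp h.1))]
    rw [List.getElem?_eq_none (by simpa using hm),
      List.getElem?_eq_none (by simpa using hm)]
    rfl

-- splitting a countdown range at any midpoint
theorem countdown_split (a m b : Int) (h1 : b ≤ m) (h2 : m ≤ a) :
    PySem.List.pyRange a b (-1)
      = PySem.List.pyRange a m (-1) ++ PySem.List.pyRange m b (-1) := by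
  rw [PySem.List.pyRange_neg_one_eq_reverse a b, PySem.List.pyRange_neg_one_eq_reverse a m,
    PySem.List.pyRange_neg_one_eq_reverse m b, ← List.reverse_append,
    ← PySem.List.pyRange_one_append (b+1) (m+1) (a+1) (by omega) (by omega)]

theorem bsLoop_eq (suff : List Int) (x : Int) :
    ∀ (t : Nat) (lo hi res : Int), (hi + 1 - lo).toNat = t →
      (∀ j k : Int, lo ≤ j → j ≤ k → k ≤ hi →
        PySem.List.pyGetD suff k 0 < x → PySem.List.pyGetD suff j 0 < x) →
      bsLoop suff x lo hi res =
        ((PySem.List.pyRange hi (lo-1) (-1)).find?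
          (fun j => decide (PySem.List.pyGetD suff j 0 < x))).getD res := by
  intro t
  induction t using Nat.strong_induction_on with
  | _ t ih =>
    intro lo hi res ht hdc
    rw [bsLoop]
    by_cases h : lo ≤ hi
    · have hmid := PySem.Int.floordiv_two_mid_bounds h
      set mid := PySem.Int.floordiv (lo + hi) 2 with hmiddef
      rw [dif_pos h]
      by_cases hp : PySem.List.pyGetD suff mid 0 < x
      · rw [if_pos hp,
          ih ((hi + 1 - (mid + 1)).toNat) (by omega) (mid+1) hi mid rfl
            (fun j k hj hk hkh hs => hdc j k (by omega) hk hkh hs)]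
        rw [countdown_split hi mid (lo-1) (by omega) (by omega), List.find?_append]
        have hmid1 : mid + 1 - 1 = mid := by ring
        rw [hmid1]
        have h2 : (PySem.List.pyRange mid (lo-1) (-1)).find?
            (fun j => decide (PySem.List.pyGetD suff j 0 < x)) = some mid := by
          rw [PySem.List.pyRange_neg_one_cons (by omega : lo - 1 < mid)]
          rw [List.find?_cons_of_pos (by simpa using hp)]
        rw [h2]
        cases hfirst : (PySem.List.pyRange hi mid (-1)).find?
            (fun j => decide (PySem.List.pyGetD suff j 0 < x)) <;> simp
      · rw [if_neg hp,
          ih ((mid - 1 + 1 - lo).toNat) (by omega) lo (mid-1) res rfl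
            (fun j k hj hk hkh hs => hdc j k hj hk (by omega) hs)]
        rw [countdown_split hi (mid-1) (lo-1) (by omega) (by omega), List.find?_append]
        have hnone : (PySem.List.pyRange hi (mid-1) (-1)).find?
            (fun j => decide (PySem.List.pyGetD suff j 0 < x)) = none := by
          apply List.find?_eq_none.mpr
          intro j hj
          rw [PySem.List.mem_pyRange_neg_one] at hj
          simp only [decide_eq_true_eq]
          exact fun hs => hp (hdc mid j hmid.1 (by omega) (by omega) hs)
        rw [hnone]
        simp
    · rw [dif_neg h, PySem.List.pyRange_neg_one_eq_nil (by omega : hi ≤ lo - 1)]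
      rfl

theorem find_transfer (N : Int) (Arr suff : List Int) (x b : Int)
    (hsm : ∀ j : Int, 0 ≤ j → j ≤ N - 1 → PySem.List.pyGetD suff j 0 = sm Arr N j)
    (hb : 0 ≤ b) :
    ∀ (t : Nat) (c : Int), (c - b).toNat = t → c ≤ N - 1 →
      (∀ j : Int, c < j → j ≤ N - 1 → ¬ PySem.List.pyGetD suff j 0 < x) →
      (PySem.List.pyRange c b (-1)).find? (fun j => decide (PySem.List.pyGetD Arr j 0 < x)) =
      (PySem.List.pyRange c b (-1)).find? (fun j => decide (PySem.List.pyGetD suff j 0 < x)) := by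
  intro t
  induction t using Nat.strong_induction_on with
  | _ t ih =>
    intro c ht hc hup
    by_cases hcb : c ≤ b
    · rw [PySem.List.pyRange_neg_one_eq_nil hcb]
      rfl
    · rw [PySem.List.pyRange_neg_one_cons (by omega : b < c)]
      have hc0 : (0:Int) ≤ c := by omega
      by_cases hpc : PySem.List.pyGetD suff c 0 < x
      · have hArr : PySem.List.pyGetD Arr c 0 < x := by
          rw [hsm c hc0 hc] at hpc
          by_cases hce : c = N - 1
          · rw [hce, sm_last] at hpc; rwa [hce]
          · have hsucc := hup (c+1) (by omega) (by omega)
            rw [hsm (c+1) (by omega) (by omega)] at hsucc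
            rw [sm_step Arr N c (by omega)] at hpc
            omega
        rw [List.find?_cons_of_pos (by simpa using hArr),
          List.find?_cons_of_pos (by simpa using hpc)]
      · have hnA : ¬ PySem.List.pyGetD Arr c 0 < x := by
          intro hA
          apply hpc
          rw [hsm c hc0 hc]
          exact lt_of_le_of_lt (sm_le Arr N c hc) hA
        rw [List.find?_cons_of_neg (by simpa using hnA),
          List.find?_cons_of_neg (by simpa using hpc)]
        exact ih ((c - 1 - b).toNat) (by omega) (c-1) rfl (by omega)
          (fun j hj1 hj2 => by
            by_cases hjc : j = c
            · rw [hjc]; exact hpc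
            · exact hup j (by omega) hj2)

-- pyGetD after pySetD, Int indices in range
theorem pyGetD_pySetD_int (s : List Int) (a b v : Int)
    (ha : 0 ≤ a) (_haL : a < (s.length : Int)) (hb : 0 ≤ b) (hbL : b < (s.length : Int)) :
    PySem.List.pyGetD (PySem.List.pySetD s a v) b 0
      = if b = a then v else PySem.List.pyGetD s b 0 := by
  rw [PySem.List.pySetD_of_nonneg s v ha]
  have hbl : b < (((s.set a.toNat v).length : Nat) : Int) := by simpa using hbL
  rw [PySem.List.pyGetD_eq_getElem _ 0 hb hbl, List.getElem_set]
  by_cases hba : b = a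
  · rw [if_pos (by omega : a.toNat = b.toNat), if_pos hba]
  · rw [if_neg (by omega : ¬ a.toNat = b.toNat), if_neg hba,
      PySem.List.pyGetD_eq_getElem s 0 hb (by simpa using hbL)]

theorem suff_spec (N : Int) (Arr : List Int) (hN : 0 < N) :
    ∀ (t : Nat) (c : Int) (s : List Int), (c + 1).toNat = t → s.length = N.toNat → c ≤ N - 2 →
      (∀ j : Int, c < j → j ≤ N - 1 → PySem.List.pyGetD s j 0 = sm Arr N j) →
      ∀ j : Int, 0 ≤ j → j ≤ N - 1 →
        PySem.List.pyGetD
          ((PySem.List.pyRange c (-1) (-1)).foldl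
            (fun s j => PySem.List.pySetD s j
              (min (PySem.List.pyGetD Arr j 0) (PySem.List.pyGetD s (j+1) 0))) s) j 0
          = sm Arr N j := by
  intro t
  induction t using Nat.strong_induction_on with
  | _ t ih =>
    intro c s ht hlen hc hs j hj0 hjN
    by_cases hcneg : c < 0
    · rw [PySem.List.pyRange_neg_one_eq_nil (by omega : c ≤ -1)]
      exact hs j (by omega) hjN
    · rw [PySem.List.pyRange_neg_one_cons (by omega : (-1:Int) < c)]
      simp only [List.foldl_cons]
      have hslen : ((s.length : Int)) = N.toNat := by rw [hlen]
      have hcL : c < (s.length : Int) := by omega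
      have hsucc : PySem.List.pyGetD s (c+1) 0 = sm Arr N (c+1) :=
        hs (c+1) (by omega) (by omega)
      apply ih ((c - 1) + 1).toNat (by omega) (c-1) _ rfl ?_ (by omega) ?_ j hj0 hjN
      · rw [PySem.List.length_pySetD, hlen]
      · intro j' hj1 hj2
        rw [pyGetD_pySetD_int s c j' _ (by omega) hcL (by omega) (by omega)]
        by_cases hj'c : j' = c
        · rw [if_pos hj'c, hj'c, hsucc, ← sm_step Arr N c (by omega)]
        · rw [if_neg hj'c]
          exact hs j' (by omega) hj2

theorem farNumber_alt_eq_map (N : Int) (Arr : List Int) (hN : 0 < N) :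
    farNumber_alt N Arr = (List.range N.toNat).map
      (fun (k : Nat) => bsLoop (suffArr N Arr) (PySem.List.pyGetD Arr (k : Int) 0)
        ((k : Int) + 1) (N-1) (-1)) := by
  unfold farNumber_alt
  rw [if_neg (by omega)]
  show (PySem.List.pyRange 0 N 1).foldl
      (fun ans i => ans ++ [bsLoop (suffArr N Arr) (PySem.List.pyGetD Arr i 0) (i+1) (N-1) (-1)]) []
    = _
  rw [PySem.List.foldl_append_singleton_eq_map
    (fun i => bsLoop (suffArr N Arr) (PySem.List.pyGetD Arr i 0) (i+1) (N-1) (-1)) _ [],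
    PySem.List.pyRange_one 0 N, List.map_map]
  simp [Function.comp_def]

-- ===== VERDICT (by name: the statement is the Claim_ definition above) =====
theorem farNumber_spec : Claim_equal_farNumber := by
  intro N Arr _ _
  unfold Spec_farNumber
  by_cases hN : N ≤ 0
  · unfold farNumber farNumber_alt
    rw [if_pos hN, PySem.List.pyRange_one_eq_nil hN]
    simp [Int.toNat_of_nonpos hN]
  · rw [not_le] at hN
    rw [farNumber_eq_map, farNumber_alt_eq_map N Arr hN]
    -- suffix-array facts
    have hsm : ∀ j : Int, 0 ≤ j → j ≤ N - 1 →
        PySem.List.pyGetD (suffArr N Arr) j 0 = sm Arr N j := by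
      intro j hj0 hjN
      unfold suffArr
      apply suff_spec N Arr hN ((N-2)+1).toNat (N-2) _ rfl ?_ (le_refl _) ?_ j hj0 hjN
      · rw [PySem.List.length_pySetD, List.length_replicate]
      · intro j' hj1 hj2
        have : j' = N - 1 := by omega
        subst this
        rw [pyGetD_pySetD_int _ _ _ _ (by omega)
          (by rw [List.length_replicate]; omega) (by omega)
          (by rw [List.length_replicate]; omega)]
        rw [if_pos rfl, sm_last]
    apply List.map_congr_left
    intro k hk
    rw [List.mem_range] at hk
    have hkN : (k : Int) ≤ N - 1 := by omega
    rw [bsLoop_eq (suffArr N Arr) (PySem.List.pyGetD Arr (k : Int) 0)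
      ((N - 1) + 1 - ((k : Int) + 1)).toNat ((k : Int) + 1) (N-1) (-1) rfl ?hdc]
    case hdc =>
      intro j k' hj hk' hk'N hlt
      rw [hsm j (by omega) (by omega)]
      rw [hsm k' (by omega) hk'N] at hlt
      exact lt_of_le_of_lt (sm_mono Arr N (k' - j).toNat j k' rfl hk' hk'N) hlt
    have h1 : (k : Int) + 1 - 1 = (k : Int) := by ring
    rw [h1]
    unfold fA
    rw [find_transfer N Arr (suffArr N Arr) (PySem.List.pyGetD Arr (k : Int) 0) (k : Int)
      hsm (by omega) (N - 1 - k).toNat (N-1) rfl (le_refl _)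
      (fun j hj1 hj2 => by omega)]
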